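-- pv_equiv track=rewrite | github.com/uliana-sentsova/scripts | detecting paradigm.py | accented
-- ===== SOURCE A (Python) =====
-- def accented(verb):
--     vocals = "aioue"
--     accent = {"a": "à", "i": "ì", "u": "ù", "e": "è", "o": "ò"}
--     ind = -1
--     for i in range(0, len(verb)):
--         if verb[i] in vocals:
--             ind = i
--             break
--     if ind != -1:
--         verb = verb[:ind] + accent[verb[ind]] + verb[ind + 1:]
--     return verb
-- ===== SOURCE B (Python) =====
-- import re
--
-- _ACCENT = {"a": "à", "i": "ì", "u": "ù", "e": "è", "o": "ò"}
--
-- def accented(verb):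
--     return re.sub(r"[aioue]", lambda m: _ACCENT[m.group()], verb, count=1)
-- ===== Notes on version B (the rewrite author's own statement) =====
-- stated objective: idiomatic
-- what changed: The explicit index scan, sentinel ind=-1 and manual slice-splice are replaced by a single regex substitution with count=1 that replaces the first vowel in place; no index variable or slicing remains.
import Mathlib
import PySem

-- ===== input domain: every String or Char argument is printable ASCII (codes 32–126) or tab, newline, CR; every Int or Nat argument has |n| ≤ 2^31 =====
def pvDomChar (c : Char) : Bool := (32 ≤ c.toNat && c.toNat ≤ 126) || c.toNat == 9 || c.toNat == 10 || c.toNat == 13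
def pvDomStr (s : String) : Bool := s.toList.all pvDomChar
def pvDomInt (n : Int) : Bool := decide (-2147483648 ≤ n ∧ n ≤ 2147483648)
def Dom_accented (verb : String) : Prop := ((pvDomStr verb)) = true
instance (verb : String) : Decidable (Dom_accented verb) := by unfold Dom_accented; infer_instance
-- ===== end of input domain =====

-- B replaces A's index scan + sentinel + slice-splice by a single first-match substitution.

-- ===== PORT A =====
-- vocals = "aioue"; 'verb[i] in vocals' on a single char is membership in its chars
def vocalsA : List Char := ['a', 'i', 'o', 'u', 'e']

-- accent = {"a": "à", "i": "ì", "u": "ù", "e": "è", "o": "ò"}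
def accentDictA : PySem.Dict Char Char :=
  PySem.Dict.ofList [('a', 'à'), ('i', 'ì'), ('u', 'ù'), ('e', 'è'), ('o', 'ò')]

-- ind = -1; for i in range(0, len(verb)): if verb[i] in vocals: ind = i; break
def accentedLoopA : List Char → Int → Int
  | [], _ => -1
  | c :: cs, i => if c ∈ vocalsA then i else accentedLoopA cs (i + 1)

def accented (verb : String) : String :=
  let cs := verb.toList
  let ind : Int := accentedLoopA cs 0
  if ind ≠ -1 then
    -- verb = verb[:ind] + accent[verb[ind]] + verb[ind+1:]  (the key is always present here)
    String.ofList (PySem.List.slice cs none (some ind)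
      ++ [(accentDictA.get? ((PySem.List.pyGet? cs ind).getD ' ')).getD ' ']
      ++ PySem.List.slice cs (some (ind + 1)) none)
  else verb

-- ===== PORT B =====
-- re.sub(r"[aioue]", lambda m: accent[m.group()], verb, count=1):
-- replace the FIRST character matching the vowel class, leave the rest untouched
def accentOfB (c : Char) : Option Char :=
  if c = 'a' then some 'à' else if c = 'i' then some 'ì' else if c = 'o' then some 'ò'
  else if c = 'u' then some 'ù' else if c = 'e' then some 'è' else none

def subFirstB : List Char → List Char
  | [] => []
  | c :: cs =>
    match accentOfB c with
    | some a => a :: cs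
    | none => c :: subFirstB cs

def accented_alt (verb : String) : String := String.ofList (subFirstB verb.toList)

-- ===== PRECONDITION & SPEC =====
def Spec_accented (verb : String) (out : String) : Prop := out = accented_alt verb
instance (verb : String) (out : String) : Decidable (Spec_accented verb out) := by unfold Spec_accented; infer_instance

-- ===== CLAIM (what is proved, stated in full; the proofs are below) =====
def Claim_equal_accented : Prop := ∀ (verb : String), Dom_accented verb → Spec_accented verb (accented verb)

-- ===== LEMMAS AND PROOFS =====

lemma accentedLoopA_ge (cs : List Char) (i : Int) :
    accentedLoopA cs i = -1 ∨ i ≤ accentedLoopA cs i := by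
  induction cs generalizing i with
  | nil => left; rfl
  | cons c cs ih =>
    by_cases h : c ∈ vocalsA
    · right; simp [accentedLoopA, h]
    · rcases ih (i + 1) with h1 | h1
      · left; simpa [accentedLoopA, h] using h1
      · right; simp only [accentedLoopA, if_neg h]; omega

lemma accentedLoopA_shift (cs : List Char) (i : Int) :
    accentedLoopA cs i = if accentedLoopA cs 0 = -1 then -1 else accentedLoopA cs 0 + i := by
  induction cs generalizing i with
  | nil => simp [accentedLoopA]
  | cons c cs ih =>
    by_cases h : c ∈ vocalsA
    · simp [accentedLoopA, h]
    · simp only [accentedLoopA, if_neg h]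
      rw [ih (i + 1), ih (0 + 1)]
      rcases accentedLoopA_ge cs 0 with hg | hg <;>
        split_ifs with h1 <;> omega

lemma accentedList_eq (cs : List Char) :
    (if accentedLoopA cs 0 ≠ -1 then
      PySem.List.slice cs none (some (accentedLoopA cs 0))
        ++ [(accentDictA.get? ((PySem.List.pyGet? cs (accentedLoopA cs 0)).getD ' ')).getD ' ']
        ++ PySem.List.slice cs (some (accentedLoopA cs 0 + 1)) none
    else cs) = subFirstB cs := by
  induction cs with
  | nil => simp [accentedLoopA, subFirstB]
  | cons c cs ih =>
    by_cases h : c ∈ vocalsA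
    · have hloop : accentedLoopA (c :: cs) 0 = 0 := by simp [accentedLoopA, h]
      rw [hloop]
      simp only [vocalsA, List.mem_cons, List.not_mem_nil, or_false] at h
      rcases h with hc | hc | hc | hc | hc <;> subst hc <;>
        · rw [PySem.List.slice_to _ (by omega : (0:Int) ≤ 0),
            PySem.List.slice_from _ (by omega : (0:Int) ≤ 0 + 1)]
          simp only [subFirstB, accentOfB, Int.toNat_zero, List.take_zero,
            List.nil_append]
          norm_num
          try simp
          decide
    · have hloop : accentedLoopA (c :: cs) 0 = accentedLoopA cs (0 + 1) := by
        simp [accentedLoopA, h]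
      have hOf : accentOfB c = none := by
        simp only [vocalsA, List.mem_cons, List.not_mem_nil, or_false,
          not_or] at h
        obtain ⟨h1, h2, h3, h4, h5⟩ := h
        simp [accentOfB, h1, h2, h3, h4, h5]
      rw [hloop, accentedLoopA_shift cs (0 + 1)]
      by_cases hfin : accentedLoopA cs 0 = -1
      · simp only [hfin, ne_eq, subFirstB, hOf]
        rw [← ih]
        simp [hfin]
      · have hge : 0 ≤ accentedLoopA cs 0 := by
          rcases accentedLoopA_ge cs 0 with h' | h' <;> omega
        simp only [hfin, if_false]
        have hne : accentedLoopA cs 0 + (0 + 1) ≠ -1 := by omega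
        rw [if_pos hne]
        obtain ⟨k, hk⟩ : ∃ k : Nat, accentedLoopA cs 0 = (k : Int) :=
          ⟨(accentedLoopA cs 0).toNat, by omega⟩
        simp only [subFirstB, hOf]
        rw [← ih]
        simp only [hk, ne_eq]
        rw [if_pos (by omega : ¬ (k : Int) = -1)]
        simp only [PySem.List.pyGet?_natCast]
        rw [show ((k : Int) + (0 + 1) + 1) = ((k + 2 : Nat) : Int) by push_cast; ring,
          show ((k : Int) + (0 + 1)) = ((k + 1 : Nat) : Int) by push_cast; ring,
          show ((k : Int) + 1) = ((k + 1 : Nat) : Int) by push_cast; ring,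
          PySem.List.slice_to_natCast, PySem.List.slice_from_natCast,
          PySem.List.slice_from_natCast]
        simp [List.take_succ_cons, List.drop_succ_cons]

-- ===== VERDICT (by name: the statement is the Claim_ definition above) =====
theorem accented_spec : Claim_equal_accented := by
  intro verb _
  unfold Spec_accented accented accented_alt
  simp only
  rw [← accentedList_eq verb.toList]
  split_ifs with h
  · rfl
  · simp
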